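-- pv_equiv track=rewrite | github.com/tausenden/AutomaticGuitarArrangement | HMM_repo/core/hidden/Hidden_gen_single.py | _calculate_form_properties
-- ===== SOURCE A (Python) =====
-- def _calculate_form_properties(fret_config, base_position):
--     """Calculate index position, width, and number of fingers for a form"""
--     # Find all non-open frets
--     pressed_frets = [fret for fret in fret_config.values() if fret > 0]
--
--     if not pressed_frets:
--         # All open strings
--         return {
--             'index_pos': 0,
--             'width': 0,
--             'fingers': 0
--         }
--
--     min_fret = min(pressed_frets)
--     max_fret = max(pressed_frets)
--
--     # Index position is where the index finger would be
--     # Following the paper's approach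
--     index_pos = base_position
--
--     # Width is the span of the form
--     width = max_fret - min_fret + 1 if pressed_frets else 0
--
--     # Number of fingers used
--     fingers = len(pressed_frets)
--
--     return {
--         'index_pos': index_pos,
--         'width': width,
--         'fingers': fingers
--     }
-- ===== SOURCE B (Python) =====
-- def _calculate_form_properties(fret_config, base_position):
--     """Sort the pressed frets once; min/max are then the endpoints of the sorted list."""
--     pressed = sorted(f for f in fret_config.values() if f > 0)
--     if not pressed:
--         return {'index_pos': 0, 'width': 0, 'fingers': 0}
--     return {
--         'index_pos': base_position,
--         'width': pressed[-1] - pressed[0] + 1,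
--         'fingers': len(pressed),
--     }
-- ===== Notes on version B (the rewrite author's own statement) =====
-- stated objective: alternative
-- what changed: Replaces A's separate min() and max() reduction passes over the filtered list with a single sort of the pressed frets, after which min and max are just the first and last elements (pressed[0], pressed[-1]); width and fingers are read off the sorted list.
import Mathlib
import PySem

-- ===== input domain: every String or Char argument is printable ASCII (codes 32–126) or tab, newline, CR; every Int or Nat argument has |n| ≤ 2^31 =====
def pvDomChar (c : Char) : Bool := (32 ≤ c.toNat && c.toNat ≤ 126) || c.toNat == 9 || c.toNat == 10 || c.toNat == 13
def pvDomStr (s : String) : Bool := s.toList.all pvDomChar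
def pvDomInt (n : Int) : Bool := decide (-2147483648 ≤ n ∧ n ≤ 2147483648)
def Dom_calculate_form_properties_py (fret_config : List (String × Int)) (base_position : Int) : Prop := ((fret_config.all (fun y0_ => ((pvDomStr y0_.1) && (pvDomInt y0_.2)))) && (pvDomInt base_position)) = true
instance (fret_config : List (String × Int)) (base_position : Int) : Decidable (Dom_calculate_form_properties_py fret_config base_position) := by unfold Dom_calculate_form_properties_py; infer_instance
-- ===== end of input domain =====

-- B replaces A's separate min() and max() reductions over the filtered pressed frets with one
-- sort of the pressed frets; min and max are then its endpoints pressed[0] and pressed[-1].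

-- ===== PORT A =====
-- 'fret_config.values()' is the values in insertion order: fret_config.map Prod.snd.
def calculate_form_properties_py (fret_config : List (String × Int)) (base_position : Int) : List (String × Int) :=
  let pressed := (fret_config.map Prod.snd).filter (fun fret => decide (fret > 0))
  if pressed = [] then
    [("index_pos", 0), ("width", 0), ("fingers", 0)]
  else
    -- min/max raise on an empty list in Python; this branch guarantees pressed ≠ [], so getD 0 is unreachable
    let min_fret : Int := (PySem.List.min? pressed (fun y => y)).getD 0
    let max_fret : Int := (PySem.List.max? pressed (fun y => y)).getD 0
    let index_pos := base_position
    let width : Int := if pressed ≠ [] then max_fret - min_fret + 1 else 0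
    let fingers : Int := (pressed.length : Int)
    [("index_pos", index_pos), ("width", width), ("fingers", fingers)]

-- ===== PORT B =====
def calculate_form_properties_py_alt (fret_config : List (String × Int)) (base_position : Int) : List (String × Int) :=
  let pressed := PySem.List.sorted ((fret_config.map Prod.snd).filter (fun f => decide (f > 0))) (fun x => x) false
  if pressed = [] then
    [("index_pos", 0), ("width", 0), ("fingers", 0)]
  else
    -- pressed ≠ [] here, so pressed[-1] and pressed[0] cannot raise; pyGetD 0 is the total form
    [("index_pos", base_position),
     ("width", PySem.List.pyGetD pressed (-1) 0 - PySem.List.pyGetD pressed 0 0 + 1),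
     ("fingers", (pressed.length : Int))]

-- ===== PRECONDITION & SPEC =====
def Spec_calculate_form_properties_py (fret_config : List (String × Int)) (base_position : Int) (out : List (String × Int)) : Prop := out = calculate_form_properties_py_alt fret_config base_position
instance (fret_config : List (String × Int)) (base_position : Int) (out : List (String × Int)) : Decidable (Spec_calculate_form_properties_py fret_config base_position out) := by unfold Spec_calculate_form_properties_py; infer_instance

-- ===== CLAIM (what is proved, stated in full; the proofs are below) =====
def Claim_equal_calculate_form_properties_py : Prop := ∀ (fret_config : List (String × Int)) (base_position : Int), Dom_calculate_form_properties_py fret_config base_position → Spec_calculate_form_properties_py fret_config base_position (calculate_form_properties_py fret_config base_position)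

-- ===== LEMMAS AND PROOFS =====

-- The head of sorted(l) is min(l): both are minimal members, hence equal by antisymmetry.
theorem head_sorted_eq_min (l : List Int) (q : Int) (u : List Int)
    (hs : PySem.List.sorted l (fun x => x) false = q :: u) (m : Int)
    (hm : PySem.List.min? l (fun y => y) = some m) : q = m := by
  have hqmem : q ∈ l := (PySem.List.mem_sorted l (fun x => x) false q).mp (hs ▸ List.mem_cons_self)
  have hmmem : m ∈ l := PySem.List.min?_mem hm
  exact le_antisymm (PySem.List.key_head_sorted_le l (fun x => x) hs m hmmem)
    (PySem.List.min?_isMin hm q hqmem)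

-- Every member of sorted(l) is ≤ its last element.
theorem le_getLast_sorted (l : List Int) (y : Int)
    (hy : y ∈ PySem.List.sorted l (fun x => x) false)
    (hne : PySem.List.sorted l (fun x => x) false ≠ []) :
    y ≤ (PySem.List.sorted l (fun x => x) false).getLast hne := by
  obtain ⟨i, hi, rfl⟩ := List.mem_iff_getElem.mp hy
  rw [List.getLast_eq_getElem]
  exact PySem.List.key_sorted_getElem_mono (xs := l) (key := fun x => x)
    (p := i) (q := (PySem.List.sorted l (fun x => x) false).length - 1) (by omega) (by omega)

-- The last element of sorted(l) is max(l).
theorem getLast_sorted_eq_max (l : List Int)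
    (hne : PySem.List.sorted l (fun x => x) false ≠ []) (m : Int)
    (hm : PySem.List.max? l (fun y => y) = some m) :
    (PySem.List.sorted l (fun x => x) false).getLast hne = m := by
  have hLmem : (PySem.List.sorted l (fun x => x) false).getLast hne ∈ l :=
    (PySem.List.mem_sorted l (fun x => x) false _).mp (List.getLast_mem hne)
  have hmmem : m ∈ PySem.List.sorted l (fun x => x) false :=
    (PySem.List.mem_sorted l (fun x => x) false m).mpr (PySem.List.max?_mem hm)
  exact le_antisymm (PySem.List.max?_isMax hm _ hLmem) (le_getLast_sorted l m hmmem hne)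

-- ===== VERDICT (by name: the statement is the Claim_ definition above) =====
theorem calculate_form_properties_py_spec : Claim_equal_calculate_form_properties_py := by
  intro fret_config base_position _
  unfold Spec_calculate_form_properties_py calculate_form_properties_py calculate_form_properties_py_alt
  set l := (fret_config.map Prod.snd).filter (fun f => decide (f > 0)) with hl
  by_cases hp : l = []
  · simp [hp, PySem.List.sorted_eq_nil_iff]
  · have hsne : PySem.List.sorted l (fun x => x) false ≠ [] := by
      simpa [PySem.List.sorted_eq_nil_iff] using hp
    obtain ⟨p, t, hpt⟩ := List.exists_cons_of_ne_nil hp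
    have hmin : PySem.List.min? l (fun y => y) = some (t.foldl min p) := by
      rw [hpt]; exact PySem.List.min?_id_cons p t
    have hmax : PySem.List.max? l (fun y => y) = some (t.foldl max p) := by
      rw [hpt]; exact PySem.List.max?_id_cons p t
    obtain ⟨q, u, hs⟩ := List.exists_cons_of_ne_nil hsne
    have h2 : PySem.List.pyGetD (PySem.List.sorted l (fun x => x) false) 0 0 = t.foldl min p := by
      rw [hs, PySem.List.pyGetD_zero_cons]
      exact head_sorted_eq_min l q u hs _ hmin
    have h1 : PySem.List.pyGetD (PySem.List.sorted l (fun x => x) false) (-1) 0 = t.foldl max p := by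
      rw [PySem.List.pyGetD_neg_one _ _ hsne]
      exact getLast_sorted_eq_max l hsne _ hmax
    have h3 : (PySem.List.sorted l (fun x => x) false).length = l.length :=
      PySem.List.length_sorted l (fun x => x) false
    simp [if_neg hp, if_neg hsne, hmin, hmax, h1, h2, h3]
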